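-- pv_equiv track=rewrite | github.com/emirkucuk-dev/CipherFile | aes.py | en_aes
-- ===== SOURCE A (Python) =====
-- SBOX = [
--      99,124,119,123,242,107,111,197, 48,  1,103, 43,254,215,171,118,
--     202,130,201,125,250, 89, 71,240,173,212,162,175,156,164,114,192,
--     183,253,147, 38, 54, 63,247,204, 52,165,229,241,113,216, 49, 21,
--       4,199, 35,195, 24,150,  5,154,  7, 18,128,226,235, 39,178,117,
--       9,131, 44, 26, 27,110, 90,160, 82, 59,214,179, 41,227, 47,132,
--      83,209,  0,237, 32,252,177, 91,106,203,190, 57, 74, 76, 88,207,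
--     208,239,170,251, 67, 77, 51,133, 69,249,  2,127, 80, 60,159,168,
--      81,163, 64,143,146,157, 56,245,188,182,218, 33, 16,255,243,210,
--     205, 12, 19,236, 95,151, 68, 23,196,167,126, 61,100, 93, 25,115,
--      96,129, 79,220, 34, 42,144,136, 70,238,184, 20,222, 94, 11,219,
--     224, 50, 58, 10, 73,  6, 36, 92,194,211,172, 98,145,149,228,121,
--     231,200, 55,109,141,213, 78,169,108, 86,244,234,101,122,174,  8,
--     186,120, 37, 46, 28,166,180,198,232,221,116, 31, 75,189,139,138,
--     112, 62,181,102, 72,  3,246, 14, 97, 53, 87,185,134,193, 29,158,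
--     225,248,152, 17,105,217,142,148,155, 30,135,233,206, 85, 40,223,
--     140,161,137, 13,191,230, 66,104, 65,153, 45, 15,176, 84,187, 22
-- ]
--
-- def text_to_bytes(text):
--     return [ord(c) for c in text]
--
-- def bytes_to_text(byte_list):
--     return ''.join(chr(b) for b in byte_list)
--
-- def xor_bytes(a, b):
--     return [x ^ y for x, y in zip(a, b)]
--
-- def sub_bytes(block, sbox):
--     return [sbox[byte] for byte in block]
--
-- def get_round_key(key, round_num):
--     n = (round_num * 4) % 16
--     return key[n:] + key[:n]
--
-- def en_aes(text, key):
--     while len(text) % 16 != 0: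
--         text += ' '
--
--     key_bytes = text_to_bytes(key[:16])
--     encrypted = []
--
--     for i in range(0, len(text), 16):
--         block = text_to_bytes(text[i:i+16])
--         block = xor_bytes(block, get_round_key(key_bytes, 0))
--
--         for r in range(1, 4):
--             block = sub_bytes(block, SBOX)
--             block = xor_bytes(block, get_round_key(key_bytes, r))
--
--         encrypted.extend(block)
--
--     return bytes_to_text(encrypted)
-- ===== SOURCE B (Python) =====
-- SBOX = [
--      99,124,119,123,242,107,111,197, 48,  1,103, 43,254,215,171,118,
--     202,130,201,125,250, 89, 71,240,173,212,162,175,156,164,114,192,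
--     183,253,147, 38, 54, 63,247,204, 52,165,229,241,113,216, 49, 21,
--       4,199, 35,195, 24,150,  5,154,  7, 18,128,226,235, 39,178,117,
--       9,131, 44, 26, 27,110, 90,160, 82, 59,214,179, 41,227, 47,132,
--      83,209,  0,237, 32,252,177, 91,106,203,190, 57, 74, 76, 88,207,
--     208,239,170,251, 67, 77, 51,133, 69,249,  2,127, 80, 60,159,168,
--      81,163, 64,143,146,157, 56,245,188,182,218, 33, 16,255,243,210,
--     205, 12, 19,236, 95,151, 68, 23,196,167,126, 61,100, 93, 25,115,
--      96,129, 79,220, 34, 42,144,136, 70,238,184, 20,222, 94, 11,219,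
--     224, 50, 58, 10, 73,  6, 36, 92,194,211,172, 98,145,149,228,121,
--     231,200, 55,109,141,213, 78,169,108, 86,244,234,101,122,174,  8,
--     186,120, 37, 46, 28,166,180,198,232,221,116, 31, 75,189,139,138,
--     112, 62,181,102, 72,  3,246, 14, 97, 53, 87,185,134,193, 29,158,
--     225,248,152, 17,105,217,142,148,155, 30,135,233,206, 85, 40,223,
--     140,161,137, 13,191,230, 66,104, 65,153, 45, 15,176, 84,187, 22
-- ]
--
-- def en_aes(text, key):
--     # pad with spaces to a multiple of 16 in one step
--     if len(text) % 16 != 0: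
--         text = text + ' ' * (16 - len(text) % 16)
--     kb = [ord(c) for c in key[:16]]
--     L = len(kb)
--     # the four round keys, computed once (A recomputes them per block)
--     rk0 = kb
--     rk1 = kb[4:] + kb[:4]
--     rk2 = kb[8:] + kb[:8]
--     rk3 = kb[12:] + kb[:12]
--     # per-position lookup table: each output byte depends only on the input
--     # byte at the same position j of its block
--     tables = [[SBOX[SBOX[SBOX[x ^ rk0[j]] ^ rk1[j]] ^ rk2[j]] ^ rk3[j]
--                for x in range(256)] for j in range(L)]
--     out = []
--     for i in range(0, len(text), 16):
--         block = text[i:i+16]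
--         for j in range(L):
--             out.append(tables[j][ord(block[j])])
--     return ''.join(chr(b) for b in out)
-- ===== Notes on version B (the rewrite author's own statement) =====
-- stated objective: faster
-- what changed: B pads in one step, computes the four round keys once instead of per block, and collapses the whole 4-round per-byte pipeline (xor, three sbox substitutions, three more xors) into one precomputed 256-entry lookup table per block position, so each output byte is a single table lookup.
import Mathlib
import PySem

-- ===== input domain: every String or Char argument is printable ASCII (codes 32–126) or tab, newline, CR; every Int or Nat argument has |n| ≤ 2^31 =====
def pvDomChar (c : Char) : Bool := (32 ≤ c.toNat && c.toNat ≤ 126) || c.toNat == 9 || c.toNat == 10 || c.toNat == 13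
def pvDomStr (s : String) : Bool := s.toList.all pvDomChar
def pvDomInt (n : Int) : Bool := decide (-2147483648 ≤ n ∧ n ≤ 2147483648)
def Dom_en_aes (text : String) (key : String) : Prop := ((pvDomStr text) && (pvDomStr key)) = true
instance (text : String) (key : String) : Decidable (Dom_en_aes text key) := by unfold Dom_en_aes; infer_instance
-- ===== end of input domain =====

-- B replaces A's per-block round-key reconstruction and 4-round per-byte pipeline by
-- per-position 256-entry lookup tables built once (measured faster by a constant factor).

-- ===== PORT A =====
def SBOX : List Int := [
     99,124,119,123,242,107,111,197, 48,  1,103, 43,254,215,171,118,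
    202,130,201,125,250, 89, 71,240,173,212,162,175,156,164,114,192,
    183,253,147, 38, 54, 63,247,204, 52,165,229,241,113,216, 49, 21,
      4,199, 35,195, 24,150,  5,154,  7, 18,128,226,235, 39,178,117,
      9,131, 44, 26, 27,110, 90,160, 82, 59,214,179, 41,227, 47,132,
     83,209,  0,237, 32,252,177, 91,106,203,190, 57, 74, 76, 88,207,
    208,239,170,251, 67, 77, 51,133, 69,249,  2,127, 80, 60,159,168,
     81,163, 64,143,146,157, 56,245,188,182,218, 33, 16,255,243,210,
    205, 12, 19,236, 95,151, 68, 23,196,167,126, 61,100, 93, 25,115,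
     96,129, 79,220, 34, 42,144,136, 70,238,184, 20,222, 94, 11,219,
    224, 50, 58, 10, 73,  6, 36, 92,194,211,172, 98,145,149,228,121,
    231,200, 55,109,141,213, 78,169,108, 86,244,234,101,122,174,  8,
    186,120, 37, 46, 28,166,180,198,232,221,116, 31, 75,189,139,138,
    112, 62,181,102, 72,  3,246, 14, 97, 53, 87,185,134,193, 29,158,
    225,248,152, 17,105,217,142,148,155, 30,135,233,206, 85, 40,223,
    140,161,137, 13,191,230, 66,104, 65,153, 45, 15,176, 84,187, 22
]

def text_to_bytes (t : List Char) : List Int := t.map (fun c => (c.toNat : Int))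

-- chr(b): exact for 0 ≤ b < 0xD800; every byte produced here is in [0,256)
def bytes_to_text (bs : List Int) : String := String.ofList (bs.map (fun b => Char.ofNat b.toNat))

def xor_bytes (a b : List Int) : List Int := (a.zip b).map (fun p => PySem.Int.bxor p.1 p.2)

-- sbox[byte]: Python raises IndexError for byte outside [-256,256); on Dom every byte is in [0,256)
def sub_bytes (block sbox : List Int) : List Int := block.map (fun b => PySem.List.pyGetD sbox b 0)

def get_round_key (key : List Int) (round_num : Int) : List Int :=
  let n := PySem.Int.mod (round_num * 4) 16
  PySem.List.slice key (some n) none ++ PySem.List.slice key none (some n)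

-- the while loop 'while len(text) % 16 != 0: text += " "'; the fuel argument only
-- makes the loop total (at most 15 iterations are ever needed, 16 always suffices)
def padA : Nat → List Char → List Char
  | 0, t => t
  | fuel + 1, t => if t.length % 16 ≠ 0 then padA fuel (t ++ [' ']) else t

def en_aes (text : String) (key : String) : String :=
  let t := padA 16 text.toList
  let key_bytes := text_to_bytes (PySem.List.slice key.toList none (some 16))
  let encrypted := (PySem.List.pyRange 0 (t.length : Int) 16).foldl (fun acc i =>
      let b0 := text_to_bytes (PySem.List.slice t (some i) (some (i + 16)))
      let b1 := xor_bytes b0 (get_round_key key_bytes 0)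
      let b2 := (PySem.List.pyRange 1 4 1).foldl (fun blk r =>
          xor_bytes (sub_bytes blk SBOX) (get_round_key key_bytes r)) b1
      acc ++ b2) []
  bytes_to_text encrypted

-- ===== PORT B =====
-- table/list indexing below is always in range (j < L, padded block length 16, byte < 256 on Dom),
-- where Python would raise IndexError the pyGetD defaults are never reached on Dom
def en_aes_alt (text : String) (key : String) : String :=
  let t0 := text.toList
  let t := if t0.length % 16 ≠ 0 then t0 ++ List.replicate (16 - t0.length % 16) ' ' else t0
  let kb := (PySem.List.slice key.toList none (some 16)).map (fun c => (c.toNat : Int))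
  let L := kb.length
  let rk0 := kb
  let rk1 := PySem.List.slice kb (some 4) none ++ PySem.List.slice kb none (some 4)
  let rk2 := PySem.List.slice kb (some 8) none ++ PySem.List.slice kb none (some 8)
  let rk3 := PySem.List.slice kb (some 12) none ++ PySem.List.slice kb none (some 12)
  let tables := (PySem.List.pyRange 0 (L : Int) 1).map (fun j =>
      (PySem.List.pyRange 0 256 1).map (fun x =>
        PySem.Int.bxor (PySem.List.pyGetD SBOX (PySem.Int.bxor (PySem.List.pyGetD SBOX
          (PySem.Int.bxor (PySem.List.pyGetD SBOX (PySem.Int.bxor x (PySem.List.pyGetD rk0 j 0)) 0)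
            (PySem.List.pyGetD rk1 j 0)) 0) (PySem.List.pyGetD rk2 j 0)) 0)
          (PySem.List.pyGetD rk3 j 0)))
  let out := (PySem.List.pyRange 0 (t.length : Int) 16).foldl (fun acc i =>
      let block := PySem.List.slice t (some i) (some (i + 16))
      (PySem.List.pyRange 0 (L : Int) 1).foldl (fun acc2 j =>
        acc2 ++ [PySem.List.pyGetD (PySem.List.pyGetD tables j [])
                   (((PySem.List.pyGetD block j ' ').toNat : Int)) 0]) acc) []
  String.ofList (out.map (fun b => Char.ofNat b.toNat))

-- ===== PRECONDITION & SPEC =====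
def Spec_en_aes (text : String) (key : String) (out : String) : Prop := out = en_aes_alt text key
instance (text : String) (key : String) (out : String) : Decidable (Spec_en_aes text key out) := by unfold Spec_en_aes; infer_instance

-- ===== CLAIM (what is proved, stated in full; the proofs are below) =====
def Claim_equal_en_aes : Prop := ∀ (text : String) (key : String), Dom_en_aes text key → Spec_en_aes text key (en_aes text key)

-- ===== LEMMAS AND PROOFS =====

lemma padA_eq (fuel : Nat) (t : List Char) (hf : (16 - t.length % 16) % 16 ≤ fuel) :
    padA fuel t = t ++ List.replicate ((16 - t.length % 16) % 16) ' ' := by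
  induction fuel generalizing t with
  | zero =>
    have h2 : (16 - t.length % 16) % 16 = 0 := by omega
    rw [padA]
    simp [h2]
  | succ n ih =>
    rw [padA]
    split_ifs with h
    · rw [ih (t ++ [' ']) (by simp only [List.length_append, List.length_cons, List.length_nil]; omega)]
      have h2 : (16 - (t ++ [' ']).length % 16) % 16 + 1 = (16 - t.length % 16) % 16 := by
        simp only [List.length_append, List.length_cons, List.length_nil]; omega
      rw [List.append_assoc, ← h2]
      congr 1
    · have h2 : (16 - t.length % 16) % 16 = 0 := by omega
      simp [h2]

lemma pad16_eq (t : List Char) : padA 16 t = t ++ List.replicate ((16 - t.length % 16) % 16) ' ' :=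
  padA_eq 16 t (by omega)

lemma pads_eq (t0 : List Char) :
    (if t0.length % 16 ≠ 0 then t0 ++ List.replicate (16 - t0.length % 16) ' ' else t0) = padA 16 t0 := by
  rw [pad16_eq]; split_ifs with h
  · congr 2; omega
  · have h2 : (16 - t0.length % 16) % 16 = 0 := by omega
    simp [h2]

lemma padA_len_mod (t : List Char) : (padA 16 t).length % 16 = 0 := by
  rw [pad16_eq]; simp only [List.length_append, List.length_replicate]; omega

lemma padA_mem {t : List Char} {c : Char} (h : c ∈ padA 16 t) : c ∈ t ∨ c = ' ' := by
  rw [pad16_eq, List.mem_append] at h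
  rcases h with h | h
  · exact Or.inl h
  · exact Or.inr (List.eq_of_mem_replicate h)

lemma grk_eval (kb : List Int) (r : Int) (n : Nat) (h : PySem.Int.mod (r * 4) 16 = (n : Int)) :
    get_round_key kb r = kb.drop n ++ kb.take n := by
  simp only [get_round_key]
  rw [h, PySem.List.slice_from_natCast, PySem.List.slice_to_natCast]

-- per-block core: A's 4-round pipeline equals B's per-position table lookups
lemma block_core (cs : List Char) (kb : List Int) (hL : kb.length ≤ cs.length)
    (hcs : ∀ c ∈ cs, c.toNat < 256) :
    (PySem.List.pyRange 1 4 1).foldl (fun blk r =>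
        xor_bytes (sub_bytes blk SBOX) (get_round_key kb r))
      (xor_bytes (text_to_bytes cs) (get_round_key kb 0))
    = (PySem.List.pyRange 0 (kb.length : Int) 1).map (fun j =>
        PySem.List.pyGetD (PySem.List.pyGetD
          ((PySem.List.pyRange 0 (kb.length : Int) 1).map (fun j' =>
            (PySem.List.pyRange 0 256 1).map (fun x =>
              PySem.Int.bxor (PySem.List.pyGetD SBOX (PySem.Int.bxor (PySem.List.pyGetD SBOX
                (PySem.Int.bxor (PySem.List.pyGetD SBOX (PySem.Int.bxor x (PySem.List.pyGetD kb j' 0)) 0)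
                  (PySem.List.pyGetD (PySem.List.slice kb (some 4) none ++ PySem.List.slice kb none (some 4)) j' 0)) 0)
                (PySem.List.pyGetD (PySem.List.slice kb (some 8) none ++ PySem.List.slice kb none (some 8)) j' 0)) 0)
              (PySem.List.pyGetD (PySem.List.slice kb (some 12) none ++ PySem.List.slice kb none (some 12)) j' 0)))) j [])
          (((PySem.List.pyGetD cs j ' ').toNat : Int)) 0) := by
  have h14 : PySem.List.pyRange 1 4 1 = [1, 2, 3] := by decide
  have s0 : get_round_key kb 0 = kb := by
    rw [grk_eval kb 0 0 (by decide)]; simp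
  have e4 : PySem.List.slice kb (some 4) none ++ PySem.List.slice kb none (some 4) = kb.drop 4 ++ kb.take 4 := by
    rw [show (4:Int) = ((4:Nat):Int) from rfl, PySem.List.slice_from_natCast, PySem.List.slice_to_natCast]
  have e8 : PySem.List.slice kb (some 8) none ++ PySem.List.slice kb none (some 8) = kb.drop 8 ++ kb.take 8 := by
    rw [show (8:Int) = ((8:Nat):Int) from rfl, PySem.List.slice_from_natCast, PySem.List.slice_to_natCast]
  have e12 : PySem.List.slice kb (some 12) none ++ PySem.List.slice kb none (some 12) = kb.drop 12 ++ kb.take 12 := by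
    rw [show (12:Int) = ((12:Nat):Int) from rfl, PySem.List.slice_from_natCast, PySem.List.slice_to_natCast]
  rw [h14]
  simp only [List.foldl_cons, List.foldl_nil]
  rw [s0, grk_eval kb 1 4 (by decide), grk_eval kb 2 8 (by decide), grk_eval kb 3 12 (by decide),
      e4, e8, e12]
  apply List.ext_getElem
  · simp only [xor_bytes, sub_bytes, text_to_bytes, List.length_map, List.length_zip,
      List.length_append, List.length_drop, List.length_take, PySem.List.length_pyRange_one]
    omega
  · intro j h1 h2
    have hjL : j < kb.length := by
      simp only [xor_bytes, sub_bytes, text_to_bytes, List.length_map, List.length_zip,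
        List.length_append, List.length_drop, List.length_take] at h1
      omega
    have hjcs : j < cs.length := lt_of_lt_of_le hjL hL
    have hrot4 : j < (List.drop 4 kb ++ List.take 4 kb).length := by
      simp only [List.length_append, List.length_drop, List.length_take]; omega
    have hrot8 : j < (List.drop 8 kb ++ List.take 8 kb).length := by
      simp only [List.length_append, List.length_drop, List.length_take]; omega
    have hrot12 : j < (List.drop 12 kb ++ List.take 12 kb).length := by
      simp only [List.length_append, List.length_drop, List.length_take]; omega
    simp only [xor_bytes, sub_bytes, text_to_bytes, List.getElem_map, List.getElem_zip,
      PySem.List.getElem_pyRange_one, zero_add]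
    rw [PySem.List.pyGetD_map_pyRange _ _ _ _ hjL]
    rw [PySem.List.pyGetD_natCast cs j ' ', List.getD_eq_getElem _ _ hjcs]
    rw [PySem.List.pyGetD_map_pyRange_of_nonneg _ 256 _ _ (Int.natCast_nonneg _)
      (by exact_mod_cast hcs _ (List.getElem_mem hjcs))]
    rw [PySem.List.pyGetD_natCast kb j 0, List.getD_eq_getElem _ _ hjL]
    rw [PySem.List.pyGetD_natCast (List.drop 4 kb ++ List.take 4 kb) j 0, List.getD_eq_getElem _ _ hrot4]
    rw [PySem.List.pyGetD_natCast (List.drop 8 kb ++ List.take 8 kb) j 0, List.getD_eq_getElem _ _ hrot8]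
    rw [PySem.List.pyGetD_natCast (List.drop 12 kb ++ List.take 12 kb) j 0, List.getD_eq_getElem _ _ hrot12]

-- ===== VERDICT (by name: the statement is the Claim_ definition above) =====
set_option maxHeartbeats 2000000 in
theorem en_aes_spec : Claim_equal_en_aes := by
  intro text key hdom
  unfold Dom_en_aes at hdom
  unfold Spec_en_aes
  have htext : ∀ c ∈ text.toList, c.toNat < 256 := by
    intro c hc
    have h1 : pvDomStr text = true := by
      simp only [Bool.and_eq_true] at hdom
      exact hdom.1
    have h2 := List.all_eq_true.mp h1 c hc
    simp only [pvDomChar, Bool.or_eq_true, Bool.and_eq_true, decide_eq_true_eq, beq_iff_eq] at h2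
    omega
  have hchar : ∀ c ∈ padA 16 text.toList, c.toNat < 256 := by
    intro c hc
    rcases padA_mem hc with h | h
    · exact htext c h
    · subst h; decide
  simp only [en_aes, en_aes_alt, bytes_to_text, text_to_bytes]
  rw [pads_eq]
  congr 1
  congr 1
  apply PySem.List.foldl_congr_mem
  intro acc i hi
  obtain ⟨hi0, hilt, hdvd⟩ := (PySem.List.mem_pyRange_iff_of_pos (by norm_num) i).1 hi
  rw [PySem.List.foldl_append_singleton_eq_map]
  congr 1
  have hmod := padA_len_mod text.toList
  have hi16 : i.toNat + 16 ≤ (padA 16 text.toList).length := by omega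
  have hsl : PySem.List.slice (padA 16 text.toList) (some i) (some (i + 16))
      = ((padA 16 text.toList).drop i.toNat).take 16 := by
    rw [PySem.List.slice_toNat _ hi0 (by omega)]
    congr 1
    omega
  rw [hsl]
  have hlen16 : (((padA 16 text.toList).drop i.toNat).take 16).length = 16 := by
    simp only [List.length_take, List.length_drop]
    omega
  have hkbL : ((PySem.List.slice key.toList none (some 16)).map (fun c => (c.toNat : Int))).length ≤ 16 := by
    rw [PySem.List.slice_to _ (by norm_num)]
    simp [List.length_take]
  exact block_core _ _ (by rw [hlen16]; exact hkbL)
    (fun c hc => hchar c (List.mem_of_mem_drop (List.mem_of_mem_take hc)))
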